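-- pv_equiv track=rewrite | github.com/john-vh/tot-wordle | src/tot/tasks/wordle.py | vote_outputs_unwrap
-- ===== SOURCE A (Python) =====
-- def vote_outputs_unwrap(vote_outputs: list, n_candidates: int) -> list:
--     """Extract votes from the outputs and convert to values"""
--     values = [0] * n_candidates
--
--     for output in vote_outputs:
--         lines = output.strip().split('\n')
--         for line in lines:
--             for i in range(n_candidates):
--                 rank_patterns = [
--                     f"{i+1}\.", f"Rank {i+1}:", f"{i+1} -", f"#{i+1}",
--                     f"({i+1})", f"{i+1}st", f"{i+1}nd", f"{i+1}rd", f"{i+1}th"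
--                 ]
--                 if any(pattern in line for pattern in rank_patterns):
--                     values[i] += (n_candidates - i)
--                     break
--
--     return values
-- ===== SOURCE B (Python) =====
-- def _rank_patterns(k: int) -> list:
--     s = str(k)
--     return [s + "\\.", "Rank " + s + ":", s + " -", "#" + s,
--             "(" + s + ")", s + "st", s + "nd", s + "rd", s + "th"]
--
--
-- def vote_outputs_unwrap(vote_outputs: list, n_candidates: int) -> list:
--     # Candidate-major pass over a shrinking pool of lines: candidate i claims
--     # every still-unclaimed line it matches (so each line counts only for its
--     # lowest-ranked match, as in the line-major version with `break`).
--     pool = [line for output in vote_outputs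
--             for line in output.strip().split('\n')]
--     values = []
--     for i in range(n_candidates):
--         pats = _rank_patterns(i + 1)
--         hit = [any(p in line for p in pats) for line in pool]
--         values.append((n_candidates - i) * sum(hit))
--         pool = [line for line, h in zip(pool, hit) if not h]
--     return values
-- ===== Notes on version B (the rewrite author's own statement) =====
-- stated objective: alternative
-- what changed: Replaced the line-major loop (each line scans candidates 0..n-1 and breaks at the first match) by a candidate-major pass over a shrinking pool of lines: candidate i claims every still-unclaimed line it matches, and each entry is computed as (n-i) times the number of claimed lines.
import Mathlib
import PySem

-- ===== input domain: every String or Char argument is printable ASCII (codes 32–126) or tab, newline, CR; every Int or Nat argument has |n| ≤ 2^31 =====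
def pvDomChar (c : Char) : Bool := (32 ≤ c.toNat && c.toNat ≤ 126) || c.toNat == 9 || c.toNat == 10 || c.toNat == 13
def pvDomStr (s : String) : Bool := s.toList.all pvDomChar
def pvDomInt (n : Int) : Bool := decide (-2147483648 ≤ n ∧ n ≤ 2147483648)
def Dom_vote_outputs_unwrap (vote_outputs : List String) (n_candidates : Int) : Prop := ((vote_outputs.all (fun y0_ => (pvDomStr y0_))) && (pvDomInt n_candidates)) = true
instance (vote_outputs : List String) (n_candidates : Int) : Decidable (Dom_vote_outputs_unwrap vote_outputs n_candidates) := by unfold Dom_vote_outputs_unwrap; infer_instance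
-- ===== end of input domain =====

-- B replaces A's line-major loop (each line scans candidates and breaks at the first match) by a
-- candidate-major pass over a shrinking pool of lines; same results, a different traversal (objective: alternative).

-- ===== PORT A =====
-- inner `for i in range(n_candidates): ... break` of A: scan the remaining range, stop at the first match
def pvAScan (line : List Char) (n : Int) (values : List Int) : List Int → List Int
  | [] => values
  | i :: rest =>
    let s := PySem.Int.toChars (i + 1)
    let rank_patterns : List (List Char) :=
      [s ++ ['\\', '.'], ['R','a','n','k',' '] ++ s ++ [':'], s ++ [' ','-'], ['#'] ++ s,
       ['('] ++ s ++ [')'], s ++ ['s','t'], s ++ ['n','d'], s ++ ['r','d'], s ++ ['t','h']]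
    if rank_patterns.any (fun p => PySem.Chars.isIn p line) then
      PySem.List.pySetD values i (PySem.List.pyGetD values i 0 + (n - i))
    else
      pvAScan line n values rest

def vote_outputs_unwrap (vote_outputs : List String) (n_candidates : Int) : List Int :=
  let values : List Int := List.replicate n_candidates.toNat 0
  vote_outputs.foldl (fun values output =>
    (PySem.Chars.splitOn (PySem.Chars.strip output.toList) ['\n']).foldl
      (fun values line => pvAScan line n_candidates values (PySem.List.pyRange 0 n_candidates 1))
      values) values

-- ===== PORT B =====
def pvRankPatterns (k : Int) : List (List Char) :=
  let s := PySem.Int.toChars k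
  [s ++ ['\\', '.'], ['R','a','n','k',' '] ++ s ++ [':'], s ++ [' ','-'], ['#'] ++ s,
   ['('] ++ s ++ [')'], s ++ ['s','t'], s ++ ['n','d'], s ++ ['r','d'], s ++ ['t','h']]

def vote_outputs_unwrap_alt (vote_outputs : List String) (n_candidates : Int) : List Int :=
  let pool : List (List Char) :=
    vote_outputs.flatMap (fun output => PySem.Chars.splitOn (PySem.Chars.strip output.toList) ['\n'])
  ((PySem.List.pyRange 0 n_candidates 1).foldl
    (fun (st : List Int × List (List Char)) i =>
      let pats := pvRankPatterns (i + 1)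
      let hit := st.2.map (fun line => pats.any (fun p => PySem.Chars.isIn p line))
      (st.1 ++ [(n_candidates - i) * ((hit.count true : Nat) : Int)],
       ((st.2.zip hit).filter (fun lh => !lh.2)).map (fun lh => lh.1)))
    ([], pool)).1

-- ===== PRECONDITION & SPEC =====
def Spec_vote_outputs_unwrap (vote_outputs : List String) (n_candidates : Int) (out : List Int) : Prop := out = vote_outputs_unwrap_alt vote_outputs n_candidates
instance (vote_outputs : List String) (n_candidates : Int) (out : List Int) : Decidable (Spec_vote_outputs_unwrap vote_outputs n_candidates out) := by unfold Spec_vote_outputs_unwrap; infer_instance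

-- ===== CLAIM (what is proved, stated in full; the proofs are below) =====
def Claim_equal_vote_outputs_unwrap : Prop := ∀ (vote_outputs : List String) (n_candidates : Int), Dom_vote_outputs_unwrap vote_outputs n_candidates → Spec_vote_outputs_unwrap vote_outputs n_candidates (vote_outputs_unwrap vote_outputs n_candidates)

-- ===== LEMMAS AND PROOFS =====

-- the match test both programs apply to a line for candidate index i (0-based)
def pvM (l : List Char) (i : Int) : Bool := (pvRankPatterns (i + 1)).any (fun p => PySem.Chars.isIn p l)

-- "no candidate in [a, i) matches l"
def pvNB (a i : Int) (l : List Char) : Bool := (PySem.List.pyRange a i 1).all (fun k => !pvM l k)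

-- A's per-line step, abstracted
def pvAStep (n : Int) (values : List Int) (l : List Char) : List Int :=
  match (PySem.List.pyRange 0 n 1).find? (pvM l) with
  | none => values
  | some i => PySem.List.pySetD values i (PySem.List.pyGetD values i 0 + (n - i))

-- B's fold step, named
def pvBStep (n : Int) (st : List Int × List (List Char)) (i : Int) : List Int × List (List Char) :=
  let pats := pvRankPatterns (i + 1)
  let hit := st.2.map (fun line => pats.any (fun p => PySem.Chars.isIn p line))
  (st.1 ++ [(n - i) * ((hit.count true : Nat) : Int)],
   ((st.2.zip hit).filter (fun lh => !lh.2)).map (fun lh => lh.1))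

lemma pvGetDSet (v : List Int) (a j : Nat) (x : Int) (h : j < v.length) :
    (v.set a x).getD j 0 = if a = j then x else v.getD j 0 := by
  rw [List.getD_eq_getElem _ _ (by simpa using h), List.getElem_set]
  split
  · rfl
  · rw [List.getD_eq_getElem _ _ h]

lemma pvAScan_eq (l : List Char) (n : Int) (v : List Int) (R : List Int) :
    pvAScan l n v R =
      (match R.find? (pvM l) with
       | none => v
       | some i => PySem.List.pySetD v i (PySem.List.pyGetD v i 0 + (n - i))) := by
  induction R with
  | nil => simp [pvAScan, List.find?]
  | cons i rest ih =>
    have hdef : pvAScan l n v (i :: rest) =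
        (if pvM l i then PySem.List.pySetD v i (PySem.List.pyGetD v i 0 + (n - i))
         else pvAScan l n v rest) := rfl
    rw [hdef, List.find?_cons]
    cases hma : pvM l i
    · simp [ih]
    · simp

lemma pvAScan_eq_step (l : List Char) (n : Int) (v : List Int) :
    pvAScan l n v (PySem.List.pyRange 0 n 1) = pvAStep n v l := by
  rw [pvAScan_eq]; rfl

lemma pvAStep_length (n : Int) (v : List Int) (l : List Char) :
    (pvAStep n v l).length = v.length := by
  unfold pvAStep
  cases h : (PySem.List.pyRange 0 n 1).find? (pvM l) with
  | none => rfl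
  | some i => simp [PySem.List.length_pySetD]

lemma pvAFold_length (n : Int) (L : List (List Char)) :
    ∀ v : List Int, (L.foldl (pvAStep n) v).length = v.length := by
  induction L with
  | nil => intro v; rfl
  | cons l L ih => intro v; simp [List.foldl, ih, pvAStep_length]

-- each line adds (n - j) to index j exactly when j is the first matching candidate
lemma pvAFold_getD (n : Int) (L : List (List Char)) :
    ∀ (v : List Int) (j : Nat), v.length = n.toNat → j < n.toNat →
      (L.foldl (pvAStep n) v).getD j 0 =
        v.getD j 0 + (n - j) *
          (L.countP (fun l => (PySem.List.pyRange 0 n 1).find? (pvM l) = some (j : Int)) : Int) := by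
  induction L with
  | nil => intro v j hv hj; simp
  | cons l L ih =>
    intro v j hv hj
    rw [List.foldl_cons, List.countP_cons]
    cases h : (PySem.List.pyRange 0 n 1).find? (pvM l) with
    | none =>
      have hstep : pvAStep n v l = v := by unfold pvAStep; rw [h]
      rw [hstep, ih v j hv hj]
      simp
    | some i =>
      have hiR : i ∈ PySem.List.pyRange 0 n 1 := List.mem_of_find?_eq_some h
      have hi : 0 ≤ i ∧ i < n := by
        have := (PySem.List.mem_pyRange_one).mp hiR
        exact this
      have hilen : i < (v.length : Int) := by rw [hv]; omega
      have hstep : pvAStep n v l = v.set i.toNat (v.getD i.toNat 0 + (n - i)) := by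
        unfold pvAStep
        rw [h]
        show PySem.List.pySetD v i (PySem.List.pyGetD v i 0 + (n - i)) = _
        rw [PySem.List.pySetD_of_nonneg v _ hi.1,
            PySem.List.pyGetD_eq_getElem v 0 hi.1 hilen,
            List.getD_eq_getElem v 0 (by omega : i.toNat < v.length)]
      have hvlen' : (v.set i.toNat (v.getD i.toNat 0 + (n - i))).length = n.toNat := by
        simp [hv]
      rw [hstep, ih _ j hvlen' hj]
      by_cases hij : i = (j : Int)
      · have hijn : i.toNat = j := by omega
        have hjlt : j < v.length := by omega
        rw [pvGetDSet v _ _ _ hjlt, if_pos hijn]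
        subst hij
        simp
        ring
      · have hijn : i.toNat ≠ j := by omega
        rw [pvGetDSet v _ _ _ (by omega), if_neg hijn]
        simp [hij]

-- zip-with-own-hit-list filter collapses to a plain filter
lemma pvZipFilter {α : Type} (f : α → Bool) (L : List α) :
    ((L.zip (L.map f)).filter (fun lh => !lh.2)).map (fun lh => lh.1) =
      L.filter (fun l => !f l) := by
  induction L with
  | nil => rfl
  | cons x L ih =>
    by_cases h : f x <;> simp [List.zip_cons_cons, h, ih]

lemma pvCountTrueMap {α : Type} (f : α → Bool) (L : List α) :
    (L.map f).count true = L.countP f := by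
  rw [List.count_eq_countP, List.countP_map]
  apply List.countP_congr
  intro x _
  simp [Function.comp]

lemma pvRange_nil {a b : Int} (h : b ≤ a) : PySem.List.pyRange a b 1 = [] := by
  rw [PySem.List.pyRange_one]
  have : (b - a).toNat = 0 := by omega
  simp [this]

lemma pvNB_self (a : Int) (l : List Char) : pvNB a a l = true := by
  simp [pvNB, pvRange_nil (le_refl a)]

lemma pvNB_cons {a i : Int} (h : a < i) (l : List Char) :
    pvNB a i l = (!pvM l a && pvNB (a + 1) i l) := by
  simp [pvNB, PySem.List.pyRange_one_cons h]

-- the candidate-major fold, characterised: entries are (n-i) * |lines of pool matching i first|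
lemma pvBFold (n : Int) :
    ∀ (k : Nat) (a : Int), (n - a).toNat = k →
    ∀ (acc : List Int) (pool : List (List Char)),
      ((PySem.List.pyRange a n 1).foldl (pvBStep n) (acc, pool)).1 =
        acc ++ (PySem.List.pyRange a n 1).map
          (fun i => (n - i) * (pool.countP (fun l => pvM l i && pvNB a i l) : Int)) := by
  intro k
  induction k with
  | zero =>
    intro a ha acc pool
    rw [pvRange_nil (by omega)]
    simp
  | succ k ih =>
    intro a ha acc pool
    have hlt : a < n := by omega
    rw [PySem.List.pyRange_one_cons hlt]
    rw [List.foldl_cons, List.map_cons]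
    have hstep : pvBStep n (acc, pool) a =
        (acc ++ [(n - a) * (pool.countP (fun l => pvM l a) : Int)],
         pool.filter (fun l => !pvM l a)) := by
      unfold pvBStep
      simp only []
      rw [pvZipFilter, pvCountTrueMap]
      rfl
    rw [hstep, ih (a + 1) (by omega), List.append_assoc, List.singleton_append]
    congr 1
    congr 1
    · congr 2
      apply List.countP_congr
      intro l _
      simp [pvNB_self]
    · apply List.map_congr_left
      intro i hi
      have hai : a + 1 ≤ i := ((PySem.List.mem_pyRange_one).mp hi).1
      congr 1
      rw [List.countP_filter]
      congr 1
      apply List.countP_congr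
      intro l _
      rw [pvNB_cons (by omega : a < i) l]
      cases pvM l a <;> cases pvM l i <;> simp

-- a first-match found by A's scan is exactly "matches i and nothing below"
lemma pvFind_pyRange (n : Int) (l : List Char) :
    ∀ (k : Nat) (a : Int), (n - a).toNat = k →
    ∀ (j : Int), a ≤ j → j < n →
      (((PySem.List.pyRange a n 1).find? (pvM l) = some j) ↔ (pvM l j && pvNB a j l) = true) := by
  intro k
  induction k with
  | zero => intro a ha j haj hjn; omega
  | succ k ih =>
    intro a ha j haj hjn
    have hlt : a < n := by omega
    rw [PySem.List.pyRange_one_cons hlt, List.find?]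
    cases hma : pvM l a with
    | true =>
      simp only
      constructor
      · intro h
        have : a = j := by injection h
        subst this
        simp [hma, pvNB_self]
      · intro h
        by_cases hje : j = a
        · subst hje; rfl
        · exfalso
          rw [pvNB_cons (by omega : a < j)] at h
          simp [hma] at h
    | false =>
      simp only
      by_cases hje : j = a
      · subst hje
        constructor
        · intro h
          have hmem := List.mem_of_find?_eq_some h
          have := (PySem.List.mem_pyRange_one).mp hmem
          omega
        · intro h
          simp [hma] at h
      · have haj' : a + 1 ≤ j := by omega
        rw [ih (a + 1) (by omega) j haj' hjn]
        rw [pvNB_cons (by omega : a < j)]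
        simp [hma]


-- ===== VERDICT (by name: the statement is the Claim_ definition above) =====
theorem vote_outputs_unwrap_spec : Claim_equal_vote_outputs_unwrap := by
  intro vote_outputs n _
  unfold Spec_vote_outputs_unwrap
  unfold vote_outputs_unwrap vote_outputs_unwrap_alt
  simp only []
  set L : List (List Char) :=
    vote_outputs.flatMap (fun output => PySem.Chars.splitOn (PySem.Chars.strip output.toList) ['\n']) with hL
  have hA : vote_outputs.foldl (fun values output =>
      (PySem.Chars.splitOn (PySem.Chars.strip output.toList) ['\n']).foldl
        (fun values line => pvAScan line n values (PySem.List.pyRange 0 n 1)) values)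
      (List.replicate n.toNat 0) = L.foldl (pvAStep n) (List.replicate n.toNat 0) := by
    rw [hL, List.foldl_flatMap]
    congr 1
    funext v l
    congr 1
    funext v' l'
    exact pvAScan_eq_step l' n v'
  rw [hA]
  have hB : ((PySem.List.pyRange 0 n 1).foldl (pvBStep n) ([], L)).1 =
      (PySem.List.pyRange 0 n 1).map
        (fun i => (n - i) * (L.countP (fun l => pvM l i && pvNB 0 i l) : Int)) := by
    have := pvBFold n (n - 0).toNat 0 rfl [] L
    simpa using this
  have hBdef : ((PySem.List.pyRange 0 n 1).foldl
      (fun (st : List Int × List (List Char)) i =>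
        (st.1 ++ [(n - i) * (((st.2.map (fun line => (pvRankPatterns (i+1)).any
            (fun p => PySem.Chars.isIn p line))).count true : Nat) : Int)],
         ((st.2.zip (st.2.map (fun line => (pvRankPatterns (i+1)).any
            (fun p => PySem.Chars.isIn p line)))).filter (fun lh => !lh.2)).map (fun lh => lh.1)))
      ([], L)).1 = ((PySem.List.pyRange 0 n 1).foldl (pvBStep n) ([], L)).1 := rfl
  rw [hBdef, hB]
  -- both sides elementwise
  apply List.ext_getElem
  · rw [pvAFold_length]
    simp [PySem.List.length_pyRange_one]
  · intro j h1 h2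
    have hj : j < n.toNat := by
      rw [pvAFold_length] at h1; simpa using h1
    have hget := pvAFold_getD n L (List.replicate n.toNat 0) j (by simp) hj
    rw [List.getD_eq_getElem _ 0 h1] at hget
    rw [hget]
    rw [List.getElem_map, PySem.List.getElem_pyRange_one]
    have hrep : (List.replicate n.toNat (0 : Int)).getD j 0 = 0 := by
      rw [List.getD_eq_getElem _ _ (by simpa using hj)]
      simp
    have hpred : ∀ l : List Char,
        (decide ((PySem.List.pyRange 0 n 1).find? (pvM l) = some (j : Int))) =
          (pvM l (j : Int) && pvNB 0 (j : Int) l) := by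
      intro l
      have hiff := pvFind_pyRange n l (n - 0).toNat 0 rfl (j : Int) (by omega) (by omega)
      by_cases h : (PySem.List.pyRange 0 n 1).find? (pvM l) = some (j : Int)
      · rw [decide_eq_true h, (hiff.mp h).symm]
      · rw [decide_eq_false h]
        cases hb : (pvM l (j : Int) && pvNB 0 (j : Int) l) with
        | false => rfl
        | true => exact absurd (hiff.mpr hb) h
    have hcnt : L.countP (fun l => decide ((PySem.List.pyRange 0 n 1).find? (pvM l) = some (j : Int))) =
        L.countP (fun l => pvM l (j : Int) && pvNB 0 (j : Int) l) := by
      apply List.countP_congr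
      intro l _
      rw [hpred l]
    rw [hcnt, hrep, zero_add]
    norm_num
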